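-- pv_equiv track=rewrite | github.com/nitin22032002/leetcode_question | Valid Compressed String - GFG/valid-compressed-string.py | checkCompressed
-- ===== SOURCE A (Python) =====
-- def checkCompressed(S, T):
--     i=0
--     j=0
--     while(j<len(T)):
--         while(j<len(T) and i<len(S) and not (T[j]>='0' and T[j]<='9')):
--             if(S[i]!=T[j]):
--                 return 0
--             i+=1
--             j+=1
--         if(i==len(S) and j!=len(T)):return 0
--         num=0
--         while(j<len(T) and T[j]>='0' and T[j]<='9'):
--             num=num*10+int(T[j])
--             j+=1
--         i+=num
--         if(i>len(S)):return 0
--     return int(i==len(S) and j==len(T))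
-- ===== SOURCE B (Python) =====
-- def checkCompressed(S, T):
--     # tokenize T into maximal runs of digits / non-digits, then one scan over tokens
--     tokens = []
--     k = 0
--     while k < len(T):
--         j = k + 1
--         is_d = '0' <= T[k] <= '9'
--         while j < len(T) and (('0' <= T[j] <= '9') == is_d):
--             j += 1
--         tokens.append(T[k:j])
--         k = j
--     i = 0
--     for tok in tokens:
--         if i == len(S):
--             return 0
--         if '0' <= tok[0] <= '9':
--             i += int(tok)
--             if i > len(S):
--                 return 0
--         else:
--             for c in tok:
--                 if i >= len(S) or S[i] != c:
--                     return 0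
--                 i += 1
--     return int(i == len(S))
-- ===== Notes on version B (the rewrite author's own statement) =====
-- stated objective: alternative
-- what changed: A's two nested while-loops with manual digit accumulation are replaced by a two-phase decomposition: T is first tokenized into maximal digit/literal runs, then a single typed for-loop over the tokens advances one index into S.
import Mathlib
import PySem

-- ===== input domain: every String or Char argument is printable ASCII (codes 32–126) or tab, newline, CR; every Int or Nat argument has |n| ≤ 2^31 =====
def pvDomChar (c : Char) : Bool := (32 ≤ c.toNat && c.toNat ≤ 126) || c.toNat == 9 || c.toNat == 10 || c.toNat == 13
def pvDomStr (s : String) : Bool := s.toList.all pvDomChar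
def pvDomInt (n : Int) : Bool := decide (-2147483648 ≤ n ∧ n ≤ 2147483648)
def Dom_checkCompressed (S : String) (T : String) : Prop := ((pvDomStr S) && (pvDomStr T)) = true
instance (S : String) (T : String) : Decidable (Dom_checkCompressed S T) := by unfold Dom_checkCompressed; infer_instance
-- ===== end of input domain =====

-- B replaces A's nested while-loops with a tokenize-then-scan decomposition (alternative, same cost).

-- ===== PORT A =====
-- '0' <= c <= '9'
def pvIsDigit (c : Char) : Bool := decide ('0' ≤ c ∧ c ≤ '9')
-- int(T[j])
def pvDig (c : Char) : Nat := c.toNat - '0'.toNat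

-- A's inner digit while-loop: num = num*10 + int(T[j]); j += 1
def pvNumLoop (ts : List Char) (num : Nat) : Nat × List Char :=
  match ts with
  | [] => (num, [])
  | c :: rest => if pvIsDigit c then pvNumLoop rest (num * 10 + pvDig c) else (num, c :: rest)

-- termination helper for the outer loop: the digit loop never grows the remaining string
theorem pvNumLoop_snd_len : ∀ (ts : List Char) (num : Nat), ((pvNumLoop ts num).2).length ≤ ts.length := by
  intro ts
  induction ts with
  | nil => intro _; simp [pvNumLoop]
  | cons c rest ih =>
    intro num
    by_cases hd : pvIsDigit c
    · simpa [pvNumLoop, hd] using Nat.le_trans (ih (num * 10 + pvDig c)) (Nat.le_succ _)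
    · simp [pvNumLoop, hd]

-- A's outer while over T (index j becomes the remaining suffix ts, index i stays a Nat)
def pvOuterA (Sl : List Char) (i : Nat) (ts : List Char) : Int :=
  match ts with
  | [] => if i = Sl.length then 1 else 0              -- return int(i==len(S) and j==len(T))
  | c :: rest =>
    if hd : pvIsDigit c then
      if i = Sl.length then 0                         -- if(i==len(S) and j!=len(T)): return 0
      else
        match h : pvNumLoop rest (0 * 10 + pvDig c) with
        | (num, rest') =>
          if Sl.length < i + num then 0               -- if(i>len(S)): return 0
          else pvOuterA Sl (i + num) rest'
    else
      if hlt : i < Sl.length then                     -- literal while-loop, one char per step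
        if Sl[i] = c then pvOuterA Sl (i + 1) rest else 0
      else 0                                          -- if(i==len(S) and j!=len(T)): return 0
termination_by ts.length
decreasing_by
  · have h2 : ((pvNumLoop rest (0 * 10 + pvDig c)).2).length ≤ rest.length :=
      pvNumLoop_snd_len rest _
    rw [h] at h2
    simpa using Nat.lt_succ_of_le h2
  · simp

def checkCompressed (S : String) (T : String) : Int :=
  pvOuterA S.toList 0 T.toList

-- ===== PORT B =====
-- tokenize T into maximal runs of digits / non-digits
def pvTokenize (ts : List Char) : List (List Char) :=
  match ts with
  | [] => []
  | c :: rest =>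
    (c :: rest.takeWhile (fun x => pvIsDigit x == pvIsDigit c)) ::
      pvTokenize (rest.dropWhile (fun x => pvIsDigit x == pvIsDigit c))
termination_by ts.length
decreasing_by
  simpa using Nat.lt_succ_of_le (rest.length_dropWhile_le _)

-- int(tok) for an all-digit token
def pvIntOf (tok : List Char) : Nat := tok.foldl (fun a c => a * 10 + pvDig c) 0

-- the inner for-loop over a literal token: none = mismatch / S exhausted
def pvMatchLit (Sl : List Char) (i : Nat) (cs : List Char) : Option Nat :=
  match cs with
  | [] => some i
  | c :: cs' =>
    if hlt : i < Sl.length then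
      if Sl[i] = c then pvMatchLit Sl (i + 1) cs' else none
    else none

-- the for-loop over tokens
def pvGoB (Sl : List Char) (i : Nat) (toks : List (List Char)) : Int :=
  match toks with
  | [] => if i = Sl.length then 1 else 0
  | [] :: rest => pvGoB Sl i rest                     -- unreachable: tokens are nonempty
  | (c :: cs) :: rest =>
    if i = Sl.length then 0
    else if pvIsDigit c then
      if Sl.length < i + pvIntOf (c :: cs) then 0
      else pvGoB Sl (i + pvIntOf (c :: cs)) rest
    else
      match pvMatchLit Sl i (c :: cs) with
      | none => 0
      | some i' => pvGoB Sl i' rest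

def checkCompressed_alt (S : String) (T : String) : Int :=
  pvGoB S.toList 0 (pvTokenize T.toList)

-- ===== PRECONDITION & SPEC =====
def Spec_checkCompressed (S : String) (T : String) (out : Int) : Prop := out = checkCompressed_alt S T
instance (S : String) (T : String) (out : Int) : Decidable (Spec_checkCompressed S T out) := by unfold Spec_checkCompressed; infer_instance

-- ===== CLAIM (what is proved, stated in full; the proofs are below) =====
def Claim_equal_checkCompressed : Prop := ∀ (S : String) (T : String), Dom_checkCompressed S T → Spec_checkCompressed S T (checkCompressed S T)

-- ===== LEMMAS AND PROOFS =====

theorem pvBeqTrue : (fun x => pvIsDigit x == true) = pvIsDigit :=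
  funext fun x => by cases pvIsDigit x <;> rfl

theorem pvBeqFalse : (fun x => pvIsDigit x == false) = (fun x => !pvIsDigit x) :=
  funext fun x => by cases pvIsDigit x <;> rfl

-- A's digit loop is fold-over-takeWhile plus dropWhile
theorem pvNumLoop_eq : ∀ (ts : List Char) (num : Nat),
    pvNumLoop ts num =
      (List.foldl (fun a c => a * 10 + pvDig c) num (ts.takeWhile pvIsDigit),
       ts.dropWhile pvIsDigit) := by
  intro ts
  induction ts with
  | nil => intro _; simp [pvNumLoop]
  | cons c rest ih =>
    intro num
    by_cases hd : pvIsDigit c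
    · simp [pvNumLoop, hd, ih]
    · simp [pvNumLoop, hd]

-- matching a run of non-digit chars in B equals A's char-by-char literal loop
theorem pvLitStep (Sl dw : List Char)
    (H : ∀ i, pvGoB Sl i (pvTokenize dw) = pvOuterA Sl i dw) :
    ∀ (tw : List Char), (∀ c ∈ tw, pvIsDigit c = false) → ∀ i,
      (match pvMatchLit Sl i tw with
       | none => (0 : Int)
       | some i' => pvGoB Sl i' (pvTokenize dw)) = pvOuterA Sl i (tw ++ dw) := by
  intro tw
  induction tw with
  | nil => intro _ i; simpa [pvMatchLit] using H i
  | cons t tw' ih =>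
    intro hnd i
    have ht : pvIsDigit t = false := hnd t (by simp)
    by_cases hlt : i < Sl.length
    · by_cases he : Sl[i] = t
      · have := ih (fun c hc => hnd c (by simp [hc])) (i + 1)
        simpa [pvMatchLit, pvOuterA, hlt, he, ht] using this
      · simp [pvMatchLit, pvOuterA, hlt, he, ht]
    · simp [pvMatchLit, pvOuterA, hlt, ht]

-- main equivalence: B's token scan equals A's nested loops, on every suffix of T
theorem pvMain (Sl : List Char) : ∀ (n : Nat) (ts : List Char), ts.length ≤ n →
    ∀ i, pvGoB Sl i (pvTokenize ts) = pvOuterA Sl i ts := by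
  intro n
  induction n with
  | zero =>
    intro ts hts i
    have : ts = [] := List.eq_nil_of_length_eq_zero (Nat.le_zero.mp hts)
    subst this
    simp [pvTokenize, pvGoB, pvOuterA]
  | succ n ih =>
    intro ts hts i
    match ts with
    | [] => simp [pvTokenize, pvGoB, pvOuterA]
    | c :: rest =>
      have hlen : rest.length ≤ n := by simpa using hts
      by_cases hd : pvIsDigit c
      · -- digit token
        rw [pvTokenize]
        simp only [hd, pvBeqTrue]
        by_cases hi : i = Sl.length
        · simp [pvGoB, pvOuterA, hd, hi]
        · have hnum := pvNumLoop_eq rest (0 * 10 + pvDig c)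
          have hrec := ih (rest.dropWhile pvIsDigit)
            (Nat.le_trans (rest.length_dropWhile_le _) hlen)
          simp only [pvGoB, pvOuterA, hd, hi, if_false, dif_pos, hnum, pvIntOf,
            List.foldl_cons, if_true]
          split <;> simp_all
      · -- literal token
        rw [pvTokenize]
        simp only [hd, pvBeqFalse]
        by_cases hi : i = Sl.length
        · simp [pvGoB, pvOuterA, hd, hi]
        · have hsplit : rest.takeWhile (fun x => !pvIsDigit x) ++
              rest.dropWhile (fun x => !pvIsDigit x) = rest :=
            List.takeWhile_append_dropWhile
          have hnd : ∀ x ∈ c :: rest.takeWhile (fun x => !pvIsDigit x), pvIsDigit x = false := by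
            intro x hx
            rcases List.mem_cons.mp hx with h | h
            · subst h; simpa using hd
            · have := List.mem_takeWhile_imp h
              simpa using this
          have hrec : ∀ j, pvGoB Sl j (pvTokenize (rest.dropWhile (fun x => !pvIsDigit x))) =
              pvOuterA Sl j (rest.dropWhile (fun x => !pvIsDigit x)) := by
            intro j
            exact ih _ (Nat.le_trans (rest.length_dropWhile_le _) hlen) j
          have := pvLitStep Sl (rest.dropWhile (fun x => !pvIsDigit x)) hrec
            (c :: rest.takeWhile (fun x => !pvIsDigit x)) hnd i
          rw [List.cons_append, hsplit] at this
          rw [show pvGoB Sl i ((c :: rest.takeWhile (fun x => !pvIsDigit x)) ::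
              pvTokenize (rest.dropWhile (fun x => !pvIsDigit x))) =
              (match pvMatchLit Sl i (c :: rest.takeWhile (fun x => !pvIsDigit x)) with
               | none => (0 : Int)
               | some i' => pvGoB Sl i' (pvTokenize (rest.dropWhile (fun x => !pvIsDigit x))))
            from by simp [pvGoB, hi, hd]]
          · -- reduce A side literal first step is inside pvLitStep's statement already
            exact this

-- ===== VERDICT (by name: the statement is the Claim_ definition above) =====
theorem checkCompressed_spec : Claim_equal_checkCompressed := by
  intro S T _
  unfold Spec_checkCompressed checkCompressed checkCompressed_alt
  exact (pvMain S.toList T.toList.length T.toList (Nat.le_refl _) 0).symm
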